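-- pv_equiv track=rewrite | github.com/CloudSmith-Release-Safety/aws-sam-github-actions-example | lambdas/matrix/matrix.py | optimized_matrix_transpose
-- ===== SOURCE A (Python) =====
-- def optimized_matrix_transpose(size):
--     """
--     Memory-optimized matrix transpose using in-place operations
--     """
--     # Simulate transpose operation without creating full matrix
--     diagonal_sum = 0
--     for i in range(min(size, 50)):  # Limit for memory efficiency
--         diagonal_sum += (i * 2) % 100
--
--     return {
--         'diagonal_sum': diagonal_sum,
--         'transposed_elements': min(size, 50)
--     }
-- ===== SOURCE B (Python) =====
-- def optimized_matrix_transpose(size):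
--     # closed form: for i < 50, (i*2) % 100 == i*2, so the sum is 2*(0+1+...+(m-1)) = m*(m-1)
--     n = min(size, 50)
--     m = max(n, 0)
--     return {
--         'diagonal_sum': m * (m - 1),
--         'transposed_elements': n
--     }
-- ===== Notes on version B (the rewrite author's own statement) =====
-- stated objective: simpler
-- what changed: Replaces the loop summing (i*2)%100 over range(min(size,50)) with the closed form m*(m-1) where m = max(min(size,50),0), since i<50 makes the modulus a no-op.
import Mathlib
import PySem

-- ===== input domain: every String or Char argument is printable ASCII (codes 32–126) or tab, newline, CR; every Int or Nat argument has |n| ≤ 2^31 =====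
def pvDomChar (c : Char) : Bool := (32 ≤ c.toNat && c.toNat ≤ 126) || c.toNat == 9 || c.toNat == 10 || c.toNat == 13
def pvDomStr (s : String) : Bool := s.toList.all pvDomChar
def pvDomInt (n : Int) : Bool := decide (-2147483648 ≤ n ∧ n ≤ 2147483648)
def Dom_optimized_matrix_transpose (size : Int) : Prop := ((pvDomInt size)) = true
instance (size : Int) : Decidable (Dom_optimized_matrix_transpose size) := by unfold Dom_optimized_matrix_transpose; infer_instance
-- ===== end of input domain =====

-- ===== PORT A =====
-- B replaces the loop with the closed form m*(m-1), m = max(min(size,50),0) (simpler).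
def optimized_matrix_transpose (size : Int) : List (String × Int) :=
  [("diagonal_sum",
      (PySem.List.pyRange 0 (min size 50) 1).foldl
        (fun acc i => acc + PySem.Int.mod (i * 2) 100) 0),
   ("transposed_elements", min size 50)]

-- ===== PORT B =====
def optimized_matrix_transpose_alt (size : Int) : List (String × Int) :=
  [("diagonal_sum", max (min size 50) 0 * (max (min size 50) 0 - 1)),
   ("transposed_elements", min size 50)]

-- ===== PRECONDITION & SPEC =====
def Spec_optimized_matrix_transpose (size : Int) (out : List (String × Int)) : Prop := out = optimized_matrix_transpose_alt size
instance (size : Int) (out : List (String × Int)) : Decidable (Spec_optimized_matrix_transpose size out) := by unfold Spec_optimized_matrix_transpose; infer_instance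

-- ===== CLAIM (what is proved, stated in full; the proofs are below) =====
def Claim_equal_optimized_matrix_transpose : Prop := ∀ (size : Int), Dom_optimized_matrix_transpose size → Spec_optimized_matrix_transpose size (optimized_matrix_transpose size)

-- ===== LEMMAS AND PROOFS =====

-- ===== VERDICT (by name: the statement is the Claim_ definition above) =====
-- loop characterisation: for 0 ≤ n ≤ 50, the fold over range(n) equals n*(n-1)
theorem pv_sum_closed (k : Nat) (hk : k ≤ 50) :
    (PySem.List.pyRange 0 (k : Int) 1).foldl
      (fun acc i => acc + PySem.Int.mod (i * 2) 100) 0 = (k : Int) * ((k : Int) - 1) := by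
  induction k with
  | zero => decide
  | succ m ih =>
    rw [show ((m + 1 : Nat) : Int) = (m : Int) + 1 by push_cast; ring]
    rw [PySem.List.pyRange_one_succ_right (by omega)]
    rw [List.foldl_append]
    rw [ih (by omega)]
    simp only [List.foldl_cons, List.foldl_nil]
    have hmod : PySem.Int.mod ((m : Int) * 2) 100 = (m : Int) * 2 := by
      simp only [PySem.Int.mod]
      rw [Int.fmod_eq_emod]
      simp
      omega
    rw [hmod]
    ring

theorem optimized_matrix_transpose_spec : Claim_equal_optimized_matrix_transpose := by
  intro size _
  unfold Spec_optimized_matrix_transpose optimized_matrix_transpose optimized_matrix_transpose_alt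
  by_cases h : size ≤ 0
  · have hr : PySem.List.pyRange 0 (min size 50) 1 = [] := by
      have h0 : (min size 50 - 0).toNat = 0 := by omega
      rw [PySem.List.pyRange_one, h0]
      simp
    simp only [hr, List.foldl_nil]
    have hm : max (min size 50) 0 = 0 := by omega
    simp [hm]
  · set k : Nat := (min size 50).toNat with hk
    have hmin : min size 50 = (k : Int) := by omega
    have hk50 : k ≤ 50 := by omega
    have hmax : max (min size 50) 0 = (k : Int) := by omega
    have hmx : max ((k : Int)) 0 = (k : Int) := by omega
    rw [hmin, hmx, pv_sum_closed k hk50]
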